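-- pv_equiv track=rewrite | github.com/AlexVK90/HW_3Python | 3ДЗ.py | multi_pairs
-- ===== SOURCE A (Python) =====
-- def multi_pairs(s):
--     result= []
--     j = (-1)
--     if len(s)%2 != 0:
--         for i in range (int(len(s)/2 +1)):
--             result.append(s[i]*s[j])
--             j+=(-1)
--     else:
--         for i in range (int(len(s)/2)):
--             result.append(s[i]*s[j])
--             j+=(-1)
--
--     return(result)
-- ===== SOURCE B (Python) =====
-- def multi_pairs(s):
--     # Iterative both-ends peel: repeatedly pop the first and last element of a
--     # working copy and multiply them; a lone leftover middle element (odd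
--     # length) is squared. No indices, no odd/even branch.
--     work = s[:]
--     out = []
--     while len(work) > 1:
--         out.append(work.pop(0) * work.pop())
--     if work:
--         out.append(work[0] * work[0])
--     return out
-- ===== Notes on version B (the rewrite author's own statement) =====
-- stated objective: alternative
-- what changed: Replaced A's indexed loop with an odd/even branch and a hand-maintained negative index j by a loop that destructively peels one element off each end of a working copy (pop front * pop back) into an accumulator, squaring a lone middle leftover.
import Mathlib
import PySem

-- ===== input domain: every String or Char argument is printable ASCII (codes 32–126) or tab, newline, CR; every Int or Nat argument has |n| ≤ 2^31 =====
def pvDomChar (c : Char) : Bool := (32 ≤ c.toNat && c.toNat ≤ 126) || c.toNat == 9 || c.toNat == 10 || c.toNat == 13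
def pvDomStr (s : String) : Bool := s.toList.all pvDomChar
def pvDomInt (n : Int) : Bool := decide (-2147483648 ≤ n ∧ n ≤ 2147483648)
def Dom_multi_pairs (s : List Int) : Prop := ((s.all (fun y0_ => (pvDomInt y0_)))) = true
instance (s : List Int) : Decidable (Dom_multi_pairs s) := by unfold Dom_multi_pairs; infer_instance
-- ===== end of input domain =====

-- B replaces A's indexed loop (odd/even branch, hand-maintained negative index j)
-- by a recursion peeling one element off each end: first*last, then recurse on s[1:-1].

-- ===== PORT A =====
-- loop body of A: result.append(s[i]*s[j]); j += -1   (state = (result, j));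
-- indices are always in range here, so pyGetD is exact
def pvStepA (s : List Int) (st : List Int × Int) (i : Int) : List Int × Int :=
  (st.1 ++ [PySem.List.pyGetD s i 0 * PySem.List.pyGetD s st.2 0], st.2 + (-1))

-- int(len(s)/2 + 1) = len(s)//2 + 1 and int(len(s)/2) = len(s)//2 for len(s) ≥ 0,
-- so Python's float trip is exactly Int floor division here
def multi_pairs (s : List Int) : List Int :=
  if (s.length : Int) % 2 ≠ 0 then
    ((PySem.List.pyRange 0 ((s.length : Int) / 2 + 1) 1).foldl (pvStepA s) ([], -1)).1
  else
    ((PySem.List.pyRange 0 ((s.length : Int) / 2) 1).foldl (pvStepA s) ([], -1)).1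

-- ===== PORT B =====
-- while len(work) > 1: out.append(work.pop(0) * work.pop()); then a lone
-- leftover element is squared.  work.pop(0) = head, work.pop() = getLast,
-- the remaining working list is the tail with its last element dropped.
def pvLoopB (work out : List Int) : List Int :=
  match work with
  | x :: y :: rest =>
      pvLoopB ((y :: rest).dropLast) (out ++ [x * (y :: rest).getLast (by simp)])
  | [x] => out ++ [x * x]
  | [] => out
termination_by work.length
decreasing_by simp

def multi_pairs_alt (s : List Int) : List Int := pvLoopB s []

-- ===== PRECONDITION & SPEC =====
def Spec_multi_pairs (s : List Int) (out : List Int) : Prop := out = multi_pairs_alt s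
instance (s : List Int) (out : List Int) : Decidable (Spec_multi_pairs s out) := by unfold Spec_multi_pairs; infer_instance

-- ===== CLAIM (what is proved, stated in full; the proofs are below) =====
def Claim_equal_multi_pairs : Prop := ∀ (s : List Int), Dom_multi_pairs s → Spec_multi_pairs s (multi_pairs s)

-- ===== LEMMAS AND PROOFS =====

-- common characterisation: i-th product is s[i] * s[len-1-i], for ⌈len/2⌉ entries
def pairsSpec (s : List Int) : List Int :=
  (List.range ((s.length + 1) / 2)).map (fun i => s.getD i 0 * s.getD (s.length - 1 - i) 0)

lemma foldA_char (s : List Int) (k : Nat) :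
    (PySem.List.pyRange 0 (k : Int) 1).foldl (pvStepA s) ([], -1)
      = ((List.range k).map
          (fun (i : Nat) => PySem.List.pyGetD s ((i : Nat) : Int) 0 * PySem.List.pyGetD s (-1 - ((i : Nat) : Int)) 0),
         -1 - (k : Int)) := by
  induction k with
  | zero => simp [PySem.List.pyRange_one_eq_nil]
  | succ k ih =>
      have h : ((k + 1 : Nat) : Int) = (k : Int) + 1 := by push_cast; ring
      rw [h, PySem.List.pyRange_one_succ_right (by positivity), List.foldl_append, ih,
        List.range_succ, List.map_append]
      simp [pvStepA]
      ring

lemma getD_entry (s : List Int) (i : Nat) (hi : i + 1 ≤ s.length) :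
    PySem.List.pyGetD s (-1 - (i : Int)) 0 = s.getD (s.length - 1 - i) 0 := by
  have h1 : (-1 - (i : Int)) = -(((i + 1 : Nat) : Int)) := by push_cast; ring
  rw [h1, PySem.List.pyGetD_neg_natCast _ _ _ (by omega) (by exact_mod_cast hi)]
  rw [List.getD_eq_getElem _ _ (by omega)]
  congr 1
  omega

lemma A_char (s : List Int) : multi_pairs s = pairsSpec s := by
  unfold multi_pairs pairsSpec
  have key : ∀ (k : Nat), k = (s.length + 1) / 2 →
      ((PySem.List.pyRange 0 (k : Int) 1).foldl (pvStepA s) ([], -1)).1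
        = (List.range ((s.length + 1) / 2)).map
            (fun (i : Nat) => s.getD i 0 * s.getD (s.length - 1 - i) 0) := by
    intro k hk
    rw [foldA_char]
    subst hk
    apply List.map_congr_left
    intro i hi
    have hi' : i < (s.length + 1) / 2 := List.mem_range.mp hi
    rw [PySem.List.pyGetD_natCast, getD_entry s i (by omega)]
  split_ifs with hodd
  · have h2 : ((s.length : Int) / 2 + 1) = (((s.length + 1) / 2 : Nat) : Int) := by omega
    rw [h2]; exact key _ rfl
  · have h2 : ((s.length : Int) / 2) = (((s.length + 1) / 2 : Nat) : Int) := by omega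
    rw [h2]; exact key _ rfl

-- peeling both ends of a list of length ≥ 2 peels the first entry off pairsSpec
lemma getD_dropLast_eq (l : List Int) (i : Nat) (h : i < l.dropLast.length) :
    l.dropLast.getD i 0 = l.getD i 0 := by
  rw [List.getD_eq_getElem _ _ h,
      List.getD_eq_getElem _ _ (by simp at h ⊢; omega),
      List.getElem_dropLast]

lemma pairsSpec_peel (x y : Int) (rest : List Int) :
    pairsSpec (x :: y :: rest)
      = x * ((y :: rest).getLast (by simp))
          :: pairsSpec ((y :: rest).dropLast) := by
  unfold pairsSpec
  have hdl : ((y :: rest).dropLast).length = rest.length := by simp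
  have hk : ((x :: y :: rest).length + 1) / 2
      = ((((y :: rest).dropLast).length + 1) / 2) + 1 := by simp; omega
  rw [hk, List.range_succ_eq_map, List.map_cons, List.map_map]
  congr 1
  · -- head entry: s[0] * s[len-1] = x * last
    have h1 : (x :: y :: rest).length - 1 - 0 = rest.length + 1 := by simp
    rw [h1, List.getD_cons_succ, List.getD_cons_zero,
        List.getD_eq_getElem _ _ (by simp : rest.length < (y :: rest).length),
        List.getLast_eq_getElem]
    simp
    exact Or.inl rfl
  · apply List.map_congr_left
    intro i hi
    have hi' : i < (rest.length + 1) / 2 := by rw [hdl] at hi; exact List.mem_range.mp hi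
    have hir : i < rest.length := by omega
    simp only [Function.comp]
    have e1 : (x :: y :: rest).getD (i + 1) 0 = ((y :: rest).dropLast).getD i 0 := by
      rw [List.getD_cons_succ, getD_dropLast_eq _ _ (by omega)]
    have h2 : (x :: y :: rest).length - 1 - (i + 1) = (rest.length - 1 - i) + 1 := by
      simp; omega
    have h3 : ((y :: rest).dropLast).length - 1 - i = rest.length - 1 - i := by omega
    have e2 : (x :: y :: rest).getD ((x :: y :: rest).length - 1 - (i + 1)) 0
        = ((y :: rest).dropLast).getD (((y :: rest).dropLast).length - 1 - i) 0 := by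
      rw [h2, h3, List.getD_cons_succ, getD_dropLast_eq _ _ (by omega)]
    rw [e1, e2]

lemma loopB_char (s : List Int) : ∀ out, pvLoopB s out = out ++ pairsSpec s := by
  induction hn : s.length using Nat.strong_induction_on generalizing s with
  | _ n ih =>
    match s with
    | [] => intro out; simp [pvLoopB, pairsSpec]
    | [x] => intro out; simp [pvLoopB, pairsSpec]
    | x :: y :: rest =>
      intro out
      rw [pvLoopB, pairsSpec_peel,
        ih ((y :: rest).dropLast).length (by simp at hn ⊢; omega) _ rfl]
      simp

lemma B_char (s : List Int) : multi_pairs_alt s = pairsSpec s := by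
  unfold multi_pairs_alt
  rw [loopB_char]
  simp

-- ===== VERDICT (by name: the statement is the Claim_ definition above) =====
theorem multi_pairs_spec : Claim_equal_multi_pairs := by
  intro s _
  unfold Spec_multi_pairs
  rw [A_char, B_char]
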